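-- pv_equiv track=rewrite | github.com/gh0stintheshe11/LeetCode-Solutions | solutions/1844.replace-all-digits-with-characters/Python3.py | replaceDigits
-- ===== SOURCE A (Python) =====
-- def replaceDigits(s: str) -> str:
--     result = []
--
--     for i in range(0, len(s), 2):
--         letter = s[i]
--         result.append(letter)
--         if i + 1 < len(s):
--             digit = int(s[i + 1])
--             result.append(chr(ord(letter) + digit))
--
--     return ''.join(result)
-- ===== SOURCE B (Python) =====
-- def replaceDigits(s: str) -> str:
--     # Position-wise map: every character is transformed independently of the
--     # loop structure — even positions stay, each odd position i is replaced by
--     # the previous letter shifted by the digit.  No pairing loop, no appends.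
--     return ''.join(
--         c if i % 2 == 0 else chr(ord(s[i - 1]) + int(c))
--         for i, c in enumerate(s)
--     )
-- ===== Notes on version B (the rewrite author's own statement) =====
-- stated objective: idiomatic
-- what changed: A walks even indices with a stride-2 loop appending a letter and then its shifted digit (two outputs per step, with an in-loop bounds check); B is a length-preserving position-wise map over enumerate(s) that rewrites each odd-index character from its left neighbour and keeps every even-index character unchanged.
import Mathlib
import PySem

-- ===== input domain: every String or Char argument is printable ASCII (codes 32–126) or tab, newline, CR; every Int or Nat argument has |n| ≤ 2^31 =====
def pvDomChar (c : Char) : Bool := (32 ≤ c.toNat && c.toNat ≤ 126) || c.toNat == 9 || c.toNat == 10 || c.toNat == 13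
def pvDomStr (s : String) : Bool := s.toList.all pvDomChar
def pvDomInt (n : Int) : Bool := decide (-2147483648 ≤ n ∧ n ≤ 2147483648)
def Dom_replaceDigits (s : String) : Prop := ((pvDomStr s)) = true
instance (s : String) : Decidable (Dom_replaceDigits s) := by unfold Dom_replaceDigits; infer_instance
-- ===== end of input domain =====

-- B replaces A's stride-2 pair-appending loop by a length-preserving
-- position-wise map over enumerate(s) (idiomatic; same asymptotic cost).

-- ===== PORT A =====
-- the 'for i in range(0, len(s), 2)' loop as a recursion on the index i (step 2);
-- both s[i] and s[i+1] are guarded by the bound, so in-range getElem is exact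
def replaceDigitsGoA (cs : List Char) (i : Nat) (acc : List Char) : List Char :=
  if h : i < cs.length then
    replaceDigitsGoA cs (i + 2)
      (if h2 : i + 1 < cs.length then
        -- result.append(letter); digit = int(s[i+1]); result.append(chr(ord(letter) + digit))
        (acc ++ [cs[i]]) ++
          [Char.ofNat ((((cs[i]).toNat : Int) + (PySem.Int.ofChars? [cs[i+1]]).getD 0).toNat)]
      else acc ++ [cs[i]])
  else acc
termination_by cs.length - i

def replaceDigits (s : String) : String :=
  String.ofList (replaceDigitsGoA s.toList 0 [])

-- ===== PORT B =====
-- the generator expression: one map over enumerate(s); even index keeps c,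
-- odd index yields chr(ord(s[i-1]) + int(c)); s[i-1] is in range (i ≥ 1), so getD is exact
def transformB (cs : List Char) (p : Int × Char) : Char :=
  if PySem.Int.mod p.1 2 = 0 then p.2
  else Char.ofNat
    (((((PySem.List.pyGet? cs (p.1 - 1)).getD ' ').toNat : Int) +
      (PySem.Int.ofChars? [p.2]).getD 0).toNat)

def replaceDigits_alt (s : String) : String :=
  String.ofList ((PySem.List.enumerate s.toList 0).map (transformB s.toList))

-- ===== PRECONDITION & SPEC =====
-- Pre_ excludes exactly the inputs where Python A raises ValueError in int(s[i+1]):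
-- every character at an odd index must be a decimal digit.
def Pre_replaceDigits (s : String) : Prop :=
  ∀ i, (h : i < s.toList.length) → i % 2 = 1 →
    48 ≤ (s.toList[i]).toNat ∧ (s.toList[i]).toNat ≤ 57
instance (s : String) : Decidable (Pre_replaceDigits s) := by unfold Pre_replaceDigits; infer_instance
def pvWitness_replaceDigits : String := "a1c1e"

def Spec_replaceDigits (s : String) (out : String) : Prop := out = replaceDigits_alt s
instance (s : String) (out : String) : Decidable (Spec_replaceDigits s out) := by unfold Spec_replaceDigits; infer_instance

-- ===== CLAIM (what is proved, stated in full; the proofs are below) =====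
def Claim_equal_replaceDigits : Prop := ∀ (s : String), Dom_replaceDigits s → Pre_replaceDigits s → Spec_replaceDigits s (replaceDigits s)

-- ===== LEMMAS AND PROOFS =====

-- the shifted character, shared shorthand of the proofs
def shiftLD (l d : Char) : Char :=
  Char.ofNat (((l.toNat : Int) + (PySem.Int.ofChars? [d]).getD 0).toNat)

-- canonical recursive description of the result, shared target of both ports
def pairsF : List Char → List Char
  | [] => []
  | [l] => [l]
  | l :: d :: rest => l :: shiftLD l d :: pairsF rest

lemma goA_eq (cs : List Char) :
    ∀ n i acc, cs.length - i ≤ n → replaceDigitsGoA cs i acc = acc ++ pairsF (cs.drop i) := by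
  intro n
  induction n with
  | zero =>
    intro i acc hle
    have h : ¬ i < cs.length := by omega
    rw [replaceDigitsGoA, dif_neg h, List.drop_eq_nil_of_le (by omega)]
    simp [pairsF]
  | succ n ih =>
    intro i acc hle
    rw [replaceDigitsGoA]
    by_cases h : i < cs.length
    · rw [dif_pos h]
      by_cases h2 : i + 1 < cs.length
      · rw [dif_pos h2]
        have hd : cs.drop i = cs[i] :: cs[i+1] :: cs.drop (i+2) := by
          rw [List.drop_eq_getElem_cons h, List.drop_eq_getElem_cons h2]
        simp only [ih (i+2) _ (by omega), hd, pairsF, shiftLD]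
        simp
      · rw [dif_neg h2]
        have hd : cs.drop i = [cs[i]] := by
          rw [List.drop_eq_getElem_cons h]
          simp [List.drop_eq_nil_of_le (show cs.length ≤ i + 1 by omega)]
        simp only [ih (i+2) _ (by omega), hd, pairsF]
        simp [List.drop_eq_nil_of_le (show cs.length ≤ i + 2 by omega), pairsF]
    · rw [dif_neg h, List.drop_eq_nil_of_le (by omega)]
      simp [pairsF]

lemma mod_two_nat (k : Nat) : PySem.Int.mod (k : Int) 2 = ((k % 2 : Nat) : Int) := by
  rw [PySem.Int.mod_eq_emod_of_pos (by norm_num)]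
  omega

lemma mapB_eq (cs : List Char) :
    ∀ k, k % 2 = 0 →
      (PySem.List.enumerate (cs.drop k) (k : Int)).map (transformB cs) = pairsF (cs.drop k) := by
  intro k hk
  generalize hrest : cs.drop k = rest
  induction rest using pairsF.induct generalizing k with
  | case1 => simp [PySem.List.enumerate_nil, pairsF]
  | case2 l =>
    simp only [PySem.List.enumerate_cons, PySem.List.enumerate_nil, List.map_cons, List.map_nil,
      pairsF, transformB, mod_two_nat, hk]
    norm_num
  | case3 l d rest ih =>
    have hget0 : cs[k]? = some l := by
      have h0 : (cs.drop k)[0]? = some l := by rw [hrest]; rfl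
      rw [List.getElem?_drop] at h0
      simpa using h0
    have hdrop2 : cs.drop (k + 2) = rest := by
      have h2 : (cs.drop k).drop 2 = rest := by rw [hrest]; rfl
      rw [List.drop_drop] at h2
      simpa [Nat.add_comm] using h2
    have hget : PySem.List.pyGet? cs ((k : Int) + 1 - 1) = some l := by
      rw [show (k : Int) + 1 - 1 = ((k : Nat) : Int) by ring, PySem.List.pyGet?_natCast, hget0]
    have hmod : PySem.Int.mod ((k : Int) + 1) 2 = 1 := by
      rw [show ((k : Int) + 1) = ((k + 1 : Nat) : Int) by push_cast; ring, mod_two_nat]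
      omega
    have htail := ih (k + 2) (by omega) hdrop2
    simp only [PySem.List.enumerate_cons, List.map_cons, pairsF]
    have hmk : PySem.Int.mod ((k : Int)) 2 = 0 := by rw [mod_two_nat, hk]; rfl
    have hne : ¬ PySem.Int.mod ((k : Int) + 1) 2 = 0 := by rw [hmod]; norm_num
    refine congrArg₂ _ ?_ (congrArg₂ _ ?_ ?_)
    · simp only [transformB]
      rw [if_pos hmk]
    · simp only [transformB, if_neg hne, hget, shiftLD, Option.getD_some]
    · rw [show ((k : Int) + 1 + 1) = ((k + 2 : Nat) : Int) by push_cast; ring, htail]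

lemma alt_eq_pairsF (s : String) : replaceDigits_alt s = String.ofList (pairsF s.toList) := by
  unfold replaceDigits_alt
  have h := mapB_eq s.toList 0 rfl
  simp only [List.drop_zero, Nat.cast_zero] at h
  exact congrArg _ h

-- ===== VERDICT (by name: the statement is the Claim_ definition above) =====
theorem replaceDigits_spec : Claim_equal_replaceDigits := by
  intro s _ _
  unfold Spec_replaceDigits replaceDigits
  rw [alt_eq_pairsF, goA_eq s.toList s.toList.length 0 [] (by omega)]
  simp
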